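-- pv_equiv track=rewrite | github.com/bermec/challenges | cut_list2.py | convert
-- ===== SOURCE A (Python) =====
-- def convert(l, N):
--     '''shorten list of tuples to list of lists
--     of sum eight '''
--     lst2 = []
--     output_list = []
--     for tup in l:
--         lst2 = []
--         for element in tup:
--             while sum(lst2) < N:
--                 lst2.append(element)
--                 break
--         if sum(lst2) == 4:
--             output_list.append(lst2)
--     return output_list
-- ===== SOURCE B (Python) =====
-- def convert(l, N):
--     '''shorten list of tuples to list of lists of sum eight'''
--     output = []
--     for tup in l:
--         ps = [0]
--         for x in tup:
--             ps.append(ps[-1] + x)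
--         k = next((j for j, s in enumerate(ps) if s >= N), len(tup))
--         if ps[k] == 4:
--             output.append(list(tup[:k]))
--     return output
-- ===== Notes on version B (the rewrite author's own statement) =====
-- stated objective: faster
-- what changed: A grows each kept prefix element-by-element, re-summing the accumulator before every append; B builds a prefix-sum table once, finds the first crossing index k with s >= N, and slices tup[:k], testing ps[k] == 4.
import Mathlib
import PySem

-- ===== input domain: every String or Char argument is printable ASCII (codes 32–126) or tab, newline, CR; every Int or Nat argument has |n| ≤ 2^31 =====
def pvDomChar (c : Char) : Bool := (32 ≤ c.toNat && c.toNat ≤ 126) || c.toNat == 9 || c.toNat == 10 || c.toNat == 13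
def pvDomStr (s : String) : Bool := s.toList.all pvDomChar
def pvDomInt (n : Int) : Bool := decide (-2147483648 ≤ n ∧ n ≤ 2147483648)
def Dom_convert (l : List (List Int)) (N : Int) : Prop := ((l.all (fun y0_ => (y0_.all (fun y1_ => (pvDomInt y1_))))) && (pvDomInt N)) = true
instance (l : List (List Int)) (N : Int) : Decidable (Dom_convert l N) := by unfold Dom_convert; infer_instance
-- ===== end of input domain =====

-- B replaces A's element-by-element conditional append (re-summing the accumulator each step)
-- by a prefix-sum table, a first-crossing-index search and one slice; objective: alternative.

-- ===== PORT A =====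
-- inner 'for element in tup: while sum(lst2) < N: lst2.append(element); break'
def convertInner (N : Int) (tup : List Int) : List Int :=
  tup.foldl (fun lst2 element => if lst2.sum < N then lst2 ++ [element] else lst2) []

def convert (l : List (List Int)) (N : Int) : List (List Int) :=
  l.foldl (fun output_list tup =>
    let lst2 := convertInner N tup
    if lst2.sum == 4 then output_list ++ [lst2] else output_list) []

-- ===== PORT B =====
-- 'ps = [0]; for x in tup: ps.append(ps[-1] + x)'
def altPs (tup : List Int) : List Int :=
  tup.foldl (fun ps x => ps ++ [ps.getLastD 0 + x]) [0]

-- 'k = next((j for j, s in enumerate(ps) if s >= N), len(tup))'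
def altK (ps : List Int) (len : Nat) (N : Int) : Nat :=
  match ps.findIdx? (fun s => decide (N ≤ s)) with
  | some j => j
  | none => len

def convert_alt (l : List (List Int)) (N : Int) : List (List Int) :=
  l.foldl (fun output tup =>
    let ps := altPs tup
    let k := altK ps tup.length N
    -- ps[k] is always in range (k ≤ len(tup) = len(ps) - 1), so getD is exact here
    if ps.getD k 0 == 4 then output ++ [tup.take k] else output) []

-- ===== PRECONDITION & SPEC =====
def Spec_convert (l : List (List Int)) (N : Int) (out : List (List Int)) : Prop := out = convert_alt l N
instance (l : List (List Int)) (N : Int) (out : List (List Int)) : Decidable (Spec_convert l N out) := by unfold Spec_convert; infer_instance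

-- ===== CLAIM (what is proved, stated in full; the proofs are below) =====
def Claim_equal_convert : Prop := ∀ (l : List (List Int)) (N : Int), Dom_convert l N → Spec_convert l N (convert l N)

-- ===== LEMMAS AND PROOFS =====

-- reference value: the prefix kept while the running sum stays < N
def take' (N : Int) : List Int → List Int
  | [] => []
  | x :: xs => if 0 < N then x :: take' (N - x) xs else []

-- prefix sums of tup shifted by c
def sums (c : Int) : List Int → List Int
  | [] => []
  | x :: xs => (c + x) :: sums (c + x) xs

theorem take'_nonpos (N : Int) (tup : List Int) (h : N ≤ 0) : take' N tup = [] := by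
  cases tup with
  | nil => rfl
  | cons x xs => simp [take']; omega

theorem sums_length (c : Int) (tup : List Int) : (sums c tup).length = tup.length := by
  induction tup generalizing c with
  | nil => rfl
  | cons x xs ih => simp [sums, ih]

theorem altPs_foldl (tup : List Int) (ps0 : List Int) :
    tup.foldl (fun ps x => ps ++ [ps.getLastD 0 + x]) ps0
      = ps0 ++ sums (ps0.getLastD 0) tup := by
  induction tup generalizing ps0 with
  | nil => simp [sums]
  | cons x xs ih =>
    simp only [List.foldl_cons, ih, sums]
    rw [List.getLastD_concat]
    simp

theorem altPs_eq (tup : List Int) : altPs tup = 0 :: sums 0 tup := by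
  unfold altPs
  rw [altPs_foldl tup [0]]
  rfl

theorem convertInner_foldl (N : Int) (tup : List Int) (acc : List Int) :
    tup.foldl (fun lst2 element => if lst2.sum < N then lst2 ++ [element] else lst2) acc
      = acc ++ take' (N - acc.sum) tup := by
  induction tup generalizing acc with
  | nil => simp [take']
  | cons x xs ih =>
    simp only [List.foldl_cons]
    by_cases h : acc.sum < N
    · rw [if_pos h, ih]
      have h2 : take' (N - acc.sum) (x :: xs) = x :: take' (N - acc.sum - x) xs := by
        rw [take', if_pos (by omega : (0:Int) < N - acc.sum)]
      rw [h2]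
      simp only [List.sum_append, List.sum_cons, List.sum_nil, List.append_assoc,
        List.singleton_append]
      ring_nf
    · rw [if_neg h, ih]
      rw [take'_nonpos _ _ (by omega), take'_nonpos _ _ (by omega)]

theorem convertInner_eq (N : Int) (tup : List Int) : convertInner N tup = take' N tup := by
  unfold convertInner
  rw [convertInner_foldl]
  simp

theorem sums_getD (tup : List Int) (c : Int) (k : Nat) (hk : k ≤ tup.length) :
    (c :: sums c tup).getD k 0 = c + (tup.take k).sum := by
  induction tup generalizing c k with
  | nil =>
    have hk0 : k = 0 := by simpa using hk
    subst hk0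
    simp
  | cons x xs ih =>
    cases k with
    | zero => simp
    | succ k =>
      simp only [sums, List.getD_cons_succ, List.take_succ_cons, List.sum_cons]
      rw [ih (c + x) k (by simpa using hk)]
      ring

theorem sums_findIdx (tup : List Int) (c N : Int) (hc : c < N) :
    tup.take (match (sums c tup).findIdx? (fun s => decide (N ≤ s)) with
              | some j => j + 1
              | none => tup.length) = take' (N - c) tup := by
  induction tup generalizing c with
  | nil => simp [sums, take']
  | cons x xs ih =>
    simp only [sums, List.findIdx?_cons]
    by_cases h : N ≤ c + x
    · rw [if_pos (by simpa using h)]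
      simp only [List.take_succ_cons, List.take_zero, take']
      rw [if_pos (by omega : (0:Int) < N - c), take'_nonpos _ _ (by omega)]
    · rw [if_neg (by simpa using h)]
      have ih' := ih (c + x) (by omega)
      simp only [take']
      rw [if_pos (by omega : (0:Int) < N - c)]
      rcases hr : (sums (c + x) xs).findIdx? (fun s => decide (N ≤ s)) with _ | i <;>
        rw [hr] at ih' <;>
        simp only [Option.map_none, Option.map_some, List.length_cons,
          List.take_succ_cons] <;>
        rw [ih'] <;>
        ring_nf

theorem findIdx?_lt_length {α : Type} (p : α → Bool) (xs : List α) (j : Nat)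
    (h : xs.findIdx? p = some j) : j < xs.length :=
  (List.findIdx?_eq_some_iff_findIdx_eq.mp h).1

theorem per_tuple (tup : List Int) (N : Int) :
    tup.take (altK (altPs tup) tup.length N) = take' N tup ∧
    (altPs tup).getD (altK (altPs tup) tup.length N) 0 = (take' N tup).sum := by
  rw [altPs_eq]
  unfold altK
  rw [List.findIdx?_cons]
  by_cases h0 : N ≤ 0
  · rw [if_pos (by simpa using h0)]
    simp [take'_nonpos N tup h0]
  · rw [if_neg (by simpa using h0)]
    have hfi := sums_findIdx tup 0 N (by omega)
    rcases hr : (sums 0 tup).findIdx? (fun s => decide (N ≤ s)) with _ | i <;>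
      rw [hr] at hfi <;> simp only [sub_zero] at hfi <;>
      simp only [Option.map_none, Option.map_some]
    · refine ⟨hfi, ?_⟩
      rw [sums_getD tup 0 tup.length le_rfl, ← hfi]
      simp
    · have hi : i < tup.length := by
        have := findIdx?_lt_length _ _ _ hr
        rwa [sums_length] at this
      refine ⟨hfi, ?_⟩
      rw [sums_getD tup 0 (i + 1) (by omega), ← hfi]
      simp

theorem foldl_eq (l : List (List Int)) (N : Int) (acc : List (List Int)) :
    l.foldl (fun output_list tup =>
      let lst2 := convertInner N tup
      if lst2.sum == 4 then output_list ++ [lst2] else output_list) acc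
    = l.foldl (fun output tup =>
      let ps := altPs tup
      let k := altK ps tup.length N
      if ps.getD k 0 == 4 then output ++ [tup.take k] else output) acc := by
  induction l generalizing acc with
  | nil => rfl
  | cons tup rest ih =>
    simp only [List.foldl_cons]
    have h := per_tuple tup N
    rw [ih]
    congr 1
    simp only [convertInner_eq, h.1, h.2]

-- ===== VERDICT (by name: the statement is the Claim_ definition above) =====
theorem convert_spec : Claim_equal_convert := by
  intro l N _
  unfold Spec_convert convert convert_alt
  exact foldl_eq l N []
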